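-- pv_equiv track=rewrite | github.com/jenniening/deltaVinaXGB | Feature/CyclicPoseFragmentation_noH.py | determine_intersect
-- ===== SOURCE A (Python) =====
-- def determine_intersect(ring_sets):
--     Flag = False
--     for i in ring_sets:
--         for j in ring_sets:
--             if i != j:
--                 if i.intersection(j) or i.issubset(j):
--                     Flag = True
--     return Flag
-- ===== SOURCE B (Python) =====
-- def determine_intersect(ring_sets):
--     # dedup to distinct set-values once, then one sweep with a running 'seen' element set
--     seen_vals = set()
--     distinct = []
--     for s in ring_sets:
--         fs = frozenset(s)
--         if fs not in seen_vals:
--             seen_vals.add(fs)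
--             distinct.append(fs)
--     if len(distinct) >= 2 and frozenset() in distinct:
--         return True
--     seen = set()
--     for s in distinct:
--         if not seen.isdisjoint(s):
--             return True
--         seen.update(s)
--     return False
-- ===== Notes on version B (the rewrite author's own statement) =====
-- stated objective: faster
-- what changed: A compares every pair of sets (intersection/subset test per pair); B dedups to distinct set-values with a hash set in one pass, handles the empty-set case by a length check, and then makes a single sweep keeping a running set of elements seen so far, flagging any set that meets it.
import Mathlib
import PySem

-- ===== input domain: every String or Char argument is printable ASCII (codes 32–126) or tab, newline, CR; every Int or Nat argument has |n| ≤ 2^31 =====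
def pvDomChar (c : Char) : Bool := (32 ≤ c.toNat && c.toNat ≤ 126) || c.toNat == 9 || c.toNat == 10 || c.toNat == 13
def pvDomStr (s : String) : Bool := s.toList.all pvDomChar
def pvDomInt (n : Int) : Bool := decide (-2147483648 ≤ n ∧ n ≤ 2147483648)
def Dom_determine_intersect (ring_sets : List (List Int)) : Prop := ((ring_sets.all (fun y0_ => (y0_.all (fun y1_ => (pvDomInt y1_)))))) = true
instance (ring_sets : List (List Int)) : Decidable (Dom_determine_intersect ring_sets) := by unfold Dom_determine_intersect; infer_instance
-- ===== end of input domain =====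

-- B replaces A's all-pairs set scan by one dedup pass plus a single sweep with a running element set (asymptotically faster).


-- ===== PORT A =====
-- Python set primitives on a List Int holding the distinct elements of a set:
-- 'i.intersection(j)' is truthy iff nonempty, 'i.issubset(j)', and 'i != j' is set (in)equality.
def shareB (i j : List Int) : Bool := i.any (fun x => j.contains x)
def subB (i j : List Int) : Bool := i.all (fun x => j.contains x)
def setEqB (i j : List Int) : Bool := subB i j && subB j i

def determine_intersect (ring_sets : List (List Int)) : Bool :=
  ring_sets.foldl (fun flag i =>
    ring_sets.foldl (fun flag j =>
      if !(setEqB i j) then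
        if shareB i j || subB i j then true else flag
      else flag) flag) false

-- ===== PORT B =====
-- 'frozenset(s) not in seen_vals' = no set-equal value collected so far; the collected
-- values are exactly the 'distinct' list, so one list suffices for the transliteration.
def dedupGo (acc : List (List Int)) : List (List Int) → List (List Int)
  | [] => acc
  | s :: rest => if acc.any (fun t => setEqB t s) then dedupGo acc rest
                 else dedupGo (acc ++ [s]) rest

-- the second loop: 'if not seen.isdisjoint(s): return True; seen.update(s)'
def scanGo (seen : List Int) : List (List Int) → Bool
  | [] => false
  | s :: rest => if s.any (fun x => seen.contains x) then true else scanGo (seen ++ s) rest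

def determine_intersect_alt (ring_sets : List (List Int)) : Bool :=
  let distinct := dedupGo [] ring_sets
  if 2 ≤ distinct.length && distinct.any (fun t => setEqB t []) then true
  else scanGo [] distinct

-- ===== PRECONDITION & SPEC =====
def Spec_determine_intersect (ring_sets : List (List Int)) (out : Bool) : Prop := out = determine_intersect_alt ring_sets
instance (ring_sets : List (List Int)) (out : Bool) : Decidable (Spec_determine_intersect ring_sets out) := by unfold Spec_determine_intersect; infer_instance

-- ===== CLAIM (what is proved, stated in full; the proofs are below) =====
def Claim_equal_determine_intersect : Prop := ∀ (ring_sets : List (List Int)), Dom_determine_intersect ring_sets → Spec_determine_intersect ring_sets (determine_intersect ring_sets)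

-- ===== LEMMAS AND PROOFS =====

-- set equality as a Prop
def Eqv (i j : List Int) : Prop := ∀ x : Int, x ∈ i ↔ x ∈ j

-- pairwise disjointness relation used to characterise the sweep
def Disj (i j : List Int) : Prop := ∀ x : Int, x ∈ i → x ∈ j → False

theorem subB_iff (i j : List Int) : subB i j = true ↔ ∀ x ∈ i, x ∈ j := by
  simp [subB]

theorem shareB_iff (i j : List Int) : shareB i j = true ↔ ∃ x, x ∈ i ∧ x ∈ j := by
  simp [shareB]

theorem setEqB_iff (i j : List Int) : setEqB i j = true ↔ Eqv i j := by
  simp only [setEqB, Bool.and_eq_true, subB_iff, Eqv]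
  constructor
  · rintro ⟨h1, h2⟩ x; exact ⟨fun hx => h1 x hx, fun hx => h2 x hx⟩
  · intro h; exact ⟨fun x hx => (h x).1 hx, fun x hx => (h x).2 hx⟩

theorem setEqB_nil_iff (t : List Int) : setEqB t [] = true ↔ t = [] := by
  cases t <;> simp [setEqB, subB]

theorem eqv_refl (i : List Int) : Eqv i i := fun _ => Iff.rfl
theorem eqv_symm {i j : List Int} (h : Eqv i j) : Eqv j i := fun x => (h x).symm
theorem eqv_trans {i j k : List Int} (h1 : Eqv i j) (h2 : Eqv j k) : Eqv i k :=
  fun x => (h1 x).trans (h2 x)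

-- the pair condition of A's inner body
def pairCond (i j : List Int) : Bool := !(setEqB i j) && (shareB i j || subB i j)

-- P: what A computes; Q: a normalised form of it
def P (rs : List (List Int)) : Prop := ∃ i ∈ rs, ∃ j ∈ rs, pairCond i j = true

def Q (rs : List (List Int)) : Prop :=
  (∃ i ∈ rs, ∃ j ∈ rs, ¬ Eqv i j ∧ ∃ x, x ∈ i ∧ x ∈ j) ∨
  ([] ∈ rs ∧ ∃ j ∈ rs, j ≠ [])

theorem foldl_flag {α : Type} (c : α → Bool) (l : List α) (b : Bool) :
    l.foldl (fun f x => if c x then true else f) b = (b || l.any c) := by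
  induction l generalizing b with
  | nil => simp
  | cons h t ih =>
    rw [List.foldl_cons, ih, List.any_cons]
    cases hc : c h <;> cases b <;> simp

theorem A_eq_any (rs : List (List Int)) :
    determine_intersect rs = rs.any (fun i => rs.any (fun j => pairCond i j)) := by
  unfold determine_intersect
  have hinner : ∀ i : List Int,
      (fun (flag : Bool) (j : List Int) =>
        if !(setEqB i j) then if shareB i j || subB i j then true else flag else flag)
      = fun flag j => if pairCond i j then true else flag := by
    intro i; funext flag j
    cases he : setEqB i j <;> cases hc : (shareB i j || subB i j) <;>
      simp [pairCond, he, hc]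
  have houter :
      (fun (flag : Bool) (i : List Int) =>
        rs.foldl (fun flag j =>
          if !(setEqB i j) then if shareB i j || subB i j then true else flag else flag) flag)
      = fun flag i => if rs.any (fun j => pairCond i j) then true else flag := by
    funext flag i
    rw [hinner i, foldl_flag]
    cases h : rs.any (fun j => pairCond i j) <;> simp
  rw [houter, foldl_flag]
  simp

theorem pairCond_iff (i j : List Int) :
    pairCond i j = true ↔ (¬ Eqv i j ∧ (∃ x, x ∈ i ∧ x ∈ j)) ∨ (i = [] ∧ j ≠ []) := by
  simp only [pairCond, Bool.and_eq_true, Bool.not_eq_eq_eq_not, Bool.not_true,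
    Bool.or_eq_true]
  constructor
  · rintro ⟨hne, hc⟩
    have hne' : ¬ Eqv i j := fun h => by rw [(setEqB_iff i j).2 h] at hne; exact absurd hne (by simp)
    rcases hc with hs | hsub
    · exact Or.inl ⟨hne', (shareB_iff i j).1 hs⟩
    · by_cases hi : i = []
      · subst hi
        refine Or.inr ⟨rfl, ?_⟩
        intro hj; subst hj; exact hne' (eqv_refl [])
      · rcases List.exists_mem_of_ne_nil i hi with ⟨x, hx⟩
        exact Or.inl ⟨hne', x, hx, (subB_iff i j).1 hsub x hx⟩
  · rintro (⟨hne, x, hxi, hxj⟩ | ⟨hi, hj⟩)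
    · refine ⟨?_, Or.inl ((shareB_iff i j).2 ⟨x, hxi, hxj⟩)⟩
      cases h : setEqB i j
      · rfl
      · exact absurd ((setEqB_iff i j).1 h) hne
    · subst hi
      refine ⟨?_, Or.inr (by simp [subB])⟩
      cases h : setEqB [] j
      · rfl
      · exact absurd (((setEqB_iff [] j).1 h) ) (fun hE => by
          rcases List.exists_mem_of_ne_nil j hj with ⟨x, hx⟩
          exact absurd ((hE x).2 hx) (by simp))

theorem A_iff (rs : List (List Int)) : determine_intersect rs = true ↔ Q rs := by
  rw [A_eq_any]
  simp only [List.any_eq_true]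
  constructor
  · rintro ⟨i, hi, j, hj, hp⟩
    rcases (pairCond_iff i j).1 hp with ⟨hne, hx⟩ | ⟨hinil, hjne⟩
    · exact Or.inl ⟨i, hi, j, hj, hne, hx⟩
    · subst hinil; exact Or.inr ⟨hi, j, hj, hjne⟩
  · rintro (⟨i, hi, j, hj, hne, hx⟩ | ⟨hnil, j, hj, hjne⟩)
    · exact ⟨i, hi, j, hj, (pairCond_iff i j).2 (Or.inl ⟨hne, hx⟩)⟩
    · exact ⟨[], hnil, j, hj, (pairCond_iff [] j).2 (Or.inr ⟨rfl, hjne⟩)⟩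

-- ---- properties of dedupGo ----

theorem dedupGo_subset (acc l : List (List Int)) :
    ∀ t ∈ dedupGo acc l, t ∈ acc ∨ t ∈ l := by
  induction l generalizing acc with
  | nil => intro t ht; exact Or.inl ht
  | cons s rest ih =>
    intro t ht
    unfold dedupGo at ht
    split at ht
    · rcases ih acc t ht with h | h
      · exact Or.inl h
      · exact Or.inr (List.mem_cons_of_mem _ h)
    · rcases ih (acc ++ [s]) t ht with h | h
      · rcases List.mem_append.1 h with h | h
        · exact Or.inl h
        · simp at h; subst h; exact Or.inr (List.mem_cons_self)
      · exact Or.inr (List.mem_cons_of_mem _ h)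

theorem dedupGo_acc_sub (acc l : List (List Int)) :
    ∀ t ∈ acc, t ∈ dedupGo acc l := by
  induction l generalizing acc with
  | nil => intro t ht; exact ht
  | cons s rest ih =>
    intro t ht
    unfold dedupGo
    split
    · exact ih acc t ht
    · exact ih (acc ++ [s]) t (List.mem_append.2 (Or.inl ht))

theorem dedupGo_rep (acc l : List (List Int)) :
    ∀ s ∈ l, ∃ t ∈ dedupGo acc l, Eqv t s := by
  induction l generalizing acc with
  | nil => intro s hs; cases hs
  | cons s rest ih =>
    intro u hu
    rcases List.mem_cons.1 hu with rfl | hu'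
    · unfold dedupGo
      split
      next h =>
        rcases List.any_eq_true.1 h with ⟨t, ht, he⟩
        exact ⟨t, dedupGo_acc_sub acc rest t ht, (setEqB_iff t u).1 he⟩
      next h =>
        exact ⟨u, dedupGo_acc_sub (acc ++ [u]) rest u (by simp), eqv_refl u⟩
    · unfold dedupGo
      split
      · exact ih acc u hu'
      · exact ih (acc ++ [s]) u hu'

theorem dedupGo_pairwise (acc l : List (List Int))
    (h : List.Pairwise (fun a b => ¬ Eqv a b) acc) :
    List.Pairwise (fun a b => ¬ Eqv a b) (dedupGo acc l) := by
  induction l generalizing acc with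
  | nil => exact h
  | cons s rest ih =>
    unfold dedupGo
    split
    · exact ih acc h
    next hna =>
      refine ih (acc ++ [s]) ?_
      rw [List.pairwise_append]
      refine ⟨h, List.pairwise_singleton _ _, ?_⟩
      intro a ha b hb hE
      rw [List.mem_singleton] at hb
      subst hb
      exact hna (List.any_eq_true.2 ⟨a, ha, (setEqB_iff _ _).2 hE⟩)

-- ---- the sweep ----

theorem contains_iff (l : List Int) (x : Int) : l.contains x = true ↔ x ∈ l := by simp

theorem scanGo_false_iff (seen : List Int) (l : List (List Int)) :
    scanGo seen l = false ↔
      (∀ s ∈ l, ∀ x ∈ s, x ∉ seen) ∧ List.Pairwise Disj l := by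
  induction l generalizing seen with
  | nil => simp [scanGo]
  | cons s rest ih =>
    unfold scanGo
    split
    next hsh =>
      simp only [Bool.true_eq_false, false_iff]
      rcases List.any_eq_true.1 hsh with ⟨x, hxs, hxseen⟩
      rintro ⟨hfst, _⟩
      exact hfst s List.mem_cons_self x hxs ((contains_iff seen x).1 hxseen)
    next hsh =>
      rw [ih]
      have hdis : ∀ x ∈ s, x ∉ seen := by
        intro x hx hxseen
        exact hsh (List.any_eq_true.2 ⟨x, hx, (contains_iff seen x).2 hxseen⟩)
      constructor
      · rintro ⟨h1, h2⟩
        refine ⟨?_, List.pairwise_cons.2 ⟨?_, h2⟩⟩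
        · intro t ht x hxt
          rcases List.mem_cons.1 ht with rfl | ht'
          · exact hdis x hxt
          · intro hxseen
            exact h1 t ht' x hxt (List.mem_append.2 (Or.inl hxseen))
        · intro t ht x hxs hxt
          exact h1 t ht x hxt (List.mem_append.2 (Or.inr hxs))
      · rintro ⟨h1, h2⟩
        rcases List.pairwise_cons.1 h2 with ⟨hd, hrest⟩
        refine ⟨?_, hrest⟩
        intro t ht x hxt hxapp
        rcases List.mem_append.1 hxapp with hx | hx
        · exact h1 t (List.mem_cons_of_mem _ ht) x hxt hx
        · exact hd t ht x hx hxt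

-- Qd: what B computes on the dedup list
def Qd (d : List (List Int)) : Prop :=
  (2 ≤ d.length ∧ [] ∈ d) ∨ (∃ a ∈ d, ∃ b ∈ d, ¬ Eqv a b ∧ ∃ x, x ∈ a ∧ x ∈ b)

theorem B_iff_Qd (rs : List (List Int)) :
    determine_intersect_alt rs = true ↔ Qd (dedupGo [] rs) := by
  unfold determine_intersect_alt
  set d := dedupGo [] rs with hd
  have hpw : List.Pairwise (fun a b => ¬ Eqv a b) d := dedupGo_pairwise [] rs (by simp)
  show (if (decide (2 ≤ d.length) && d.any fun t => setEqB t []) = true then true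
        else scanGo [] d) = true ↔ Qd d
  have hempty : (d.any fun t => setEqB t []) = true ↔ [] ∈ d := by
    simp only [List.any_eq_true]
    constructor
    · rintro ⟨t, ht, he⟩; rw [setEqB_nil_iff] at he; subst he; exact ht
    · intro h; exact ⟨[], h, by simp [setEqB, subB]⟩
  split
  next hcond =>
    simp only [true_iff]
    rw [Bool.and_eq_true] at hcond
    exact Or.inl ⟨by simpa using hcond.1, hempty.1 hcond.2⟩
  next hcond =>
    have hnotboth : ¬ (2 ≤ d.length ∧ [] ∈ d) := by
      rintro ⟨h1, h2⟩
      exact hcond (by rw [Bool.and_eq_true]; exact ⟨by simpa using h1, hempty.2 h2⟩)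
    constructor
    · intro hscan
      refine Or.inr ?_
      by_contra hno
      have : scanGo [] d = false := by
        rw [scanGo_false_iff]
        refine ⟨by simp, ?_⟩
        rw [List.pairwise_iff_getElem] at hpw ⊢
        intro i j hi hj hij x hxa hxb
        exact hno ⟨d[i], List.getElem_mem hi, d[j], List.getElem_mem hj,
          hpw i j hi hj hij, x, hxa, hxb⟩
      rw [this] at hscan; exact absurd hscan (by simp)
    · rintro (hb | ⟨a, ha, b, hb, hne, x, hxa, hxb⟩)
      · exact absurd hb hnotboth
      · by_contra hscan
        have hfalse : scanGo [] d = false := by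
          cases h : scanGo [] d
          · rfl
          · exact absurd h hscan
        rcases (scanGo_false_iff [] d).1 hfalse with ⟨_, hdisj⟩
        have hab : a ≠ b := fun h => hne (h ▸ eqv_refl a)
        have hsymm : Symmetric Disj := fun a b h x hx1 hx2 => h x hx2 hx1
        exact (List.Pairwise.forall hsymm hdisj) ha hb hab x hxa hxb

-- two members of a pairwise-¬Eqv list that are distinct lists force length ≥ 2
theorem two_mem_length {a b : List Int} {l : List (List Int)}
    (ha : a ∈ l) (hb : b ∈ l) (hab : a ≠ b) : 2 ≤ l.length := by
  match l, ha with
  | x :: t, ha =>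
    match t, hb, ha with
    | [], hb, ha =>
      simp at ha hb; subst ha; subst hb; exact absurd rfl hab
    | y :: t', _, _ => simp

theorem Q_iff_Qd (rs : List (List Int)) : Q rs ↔ Qd (dedupGo [] rs) := by
  set d := dedupGo [] rs with hd
  have hsub : ∀ t ∈ d, t ∈ rs := by
    intro t ht; rcases dedupGo_subset [] rs t ht with h | h
    · cases h
    · exact h
  have hpw : List.Pairwise (fun a b => ¬ Eqv a b) d := dedupGo_pairwise [] rs (by simp)
  constructor
  · rintro (⟨i, hi, j, hj, hne, x, hxi, hxj⟩ | ⟨hnil, j, hj, hjne⟩)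
    · rcases dedupGo_rep [] rs i hi with ⟨a, ha, hai⟩
      rcases dedupGo_rep [] rs j hj with ⟨b, hb, hbj⟩
      refine Or.inr ⟨a, ha, b, hb, ?_, x, (hai x).2 hxi, (hbj x).2 hxj⟩
      intro hE
      exact hne (eqv_trans (eqv_trans (eqv_symm hai) hE) hbj)
    · rcases dedupGo_rep [] rs [] hnil with ⟨a, ha, hanil⟩
      have ha0 : a = [] := by
        cases a with
        | nil => rfl
        | cons y ys => exact absurd ((hanil y).1 (by simp)) (by simp)
      subst ha0
      rcases dedupGo_rep [] rs j hj with ⟨b, hb, hbj⟩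
      have hbne : b ≠ [] := by
        rintro rfl
        rcases List.exists_mem_of_ne_nil j hjne with ⟨x, hx⟩
        exact absurd ((hbj x).2 hx) (by simp)
      exact Or.inl ⟨two_mem_length ha hb (fun h => hbne h.symm), ha⟩
  · rintro (⟨hlen, hnil⟩ | ⟨a, ha, b, hb, hne, x, hxa, hxb⟩)
    · -- [] ∈ d and d has ≥ 2 members, pairwise non-equivalent: some member is nonempty
      rw [List.pairwise_iff_getElem] at hpw
      rcases List.mem_iff_getElem.1 hnil with ⟨k, hk, hdk⟩
      have hother : ∃ m, ∃ hm : m < d.length, m ≠ k := by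
        by_cases h0 : k = 0
        · exact ⟨1, by omega, by omega⟩
        · exact ⟨0, by omega, fun h => h0 (h.symm)⟩
      rcases hother with ⟨m, hm, hmk⟩
      have hnE : ¬ Eqv d[k] d[m] := by
        rcases Nat.lt_or_ge k m with h | h
        · exact hpw k m hk hm h
        · have hlt : m < k := by omega
          intro hE; exact hpw m k hm hk hlt (eqv_symm hE)
      have hne' : d[m] ≠ [] := by
        intro h
        exact hnE (by rw [hdk, h]; exact eqv_refl [])
      exact Or.inr ⟨hsub [] hnil, d[m], hsub _ (List.getElem_mem hm), hne'⟩
    · exact Or.inl ⟨a, hsub a ha, b, hsub b hb, hne, x, hxa, hxb⟩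

-- ===== VERDICT (by name: the statement is the Claim_ definition above) =====
theorem determine_intersect_spec : Claim_equal_determine_intersect := by
  intro rs _
  unfold Spec_determine_intersect
  rw [Bool.eq_iff_iff, A_iff, B_iff_Qd]
  exact Q_iff_Qd rs
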